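-- pv_equiv track=rewrite | github.com/rafaelpsilva07/rafaelmscdissertation | generate_sequence/generate_sequence.py | convert_sequence_to_symmetric_laminate
-- ===== SOURCE A (Python) =====
-- def convert_sequence_to_symmetric_laminate(sequence, isodd=False):
--     convert = {0: 0,
--                1: 90,
--                2: 45,
--                3: -45}
--
--     converted_sequence = []
--     for v in sequence:
--         converted_sequence.append(convert[v])
--
--     if isodd:
--         converted_sequence += converted_sequence[::-1][1::] # invert and removes one middle ply
--     else:
--         converted_sequence += converted_sequence[::-1]
--     return converted_sequence
-- ===== SOURCE B (Python) =====
-- def convert_sequence_to_symmetric_laminate(sequence, isodd=False):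
--     convert = {0: 0, 1: 90, 2: 45, 3: -45}
--     n = len(sequence)
--     m = 2 * n - 1 if isodd else 2 * n
--     return [convert[sequence[j if j < n else m - 1 - j]] for j in range(m)]
-- ===== Notes on version B (the rewrite author's own statement) =====
-- stated objective: alternative
-- what changed: B builds the symmetric laminate directly in one output-indexed pass (emitting convert[sequence[j]] for j < n and the reflected index for j >= n), instead of A's building the mapped list and then concatenating its reverse/slice.
import Mathlib
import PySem

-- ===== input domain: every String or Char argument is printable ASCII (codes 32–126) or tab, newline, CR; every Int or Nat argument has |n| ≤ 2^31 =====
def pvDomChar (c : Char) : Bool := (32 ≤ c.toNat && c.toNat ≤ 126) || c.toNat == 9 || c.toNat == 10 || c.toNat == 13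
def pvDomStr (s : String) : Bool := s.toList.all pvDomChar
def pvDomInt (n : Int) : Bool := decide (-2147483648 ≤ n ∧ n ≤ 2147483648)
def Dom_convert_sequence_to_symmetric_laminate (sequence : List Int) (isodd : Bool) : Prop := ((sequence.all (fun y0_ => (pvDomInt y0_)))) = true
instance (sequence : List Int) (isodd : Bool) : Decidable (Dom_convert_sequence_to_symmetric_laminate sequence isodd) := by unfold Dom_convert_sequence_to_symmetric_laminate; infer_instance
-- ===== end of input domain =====

-- B builds the symmetric laminate in one output-indexed pass, reading the input in reflected order,
-- instead of A's mapped list plus reverse/slice concatenation (objective: alternative decomposition).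

-- ===== PORT A =====
-- the dict literal {0: 0, 1: 90, 2: 45, 3: -45}
def pvConvA : PySem.Dict Int Int := PySem.Dict.ofList [(0, 0), (1, 90), (2, 45), (3, -45)]

def convert_sequence_to_symmetric_laminate (sequence : List Int) (isodd : Bool) : List Int :=
  -- for v in sequence: converted_sequence.append(convert[v])
  -- convert[v] raises KeyError off the keys {0,1,2,3}; Pre_ excludes that, so getD's default is never read
  let converted := sequence.foldl (fun acc v => acc ++ [PySem.Dict.getD pvConvA v 0]) []
  if isodd then
    -- converted_sequence[::-1][1::]  ([::-1] is reverse: PySem.List.slice?_none_none_neg_one)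
    converted ++ PySem.List.slice converted.reverse (some 1) none
  else
    converted ++ converted.reverse

-- ===== PORT B =====
-- (B declares the same dict literal; reuse the constant above)
def convert_sequence_to_symmetric_laminate_alt (sequence : List Int) (isodd : Bool) : List Int :=
  let n : Int := PySem.List.len sequence
  let m : Int := if isodd then 2 * n - 1 else 2 * n
  (PySem.List.pyRange 0 m 1).map (fun j =>
    PySem.Dict.getD pvConvA (PySem.List.pyGetD sequence (if j < n then j else m - 1 - j) 0) 0)

-- ===== PRECONDITION & SPEC =====
-- A raises KeyError on any ply value outside the dict's keys {0,1,2,3}; Pre_ admits exactly the inputs A returns on.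
def Pre_convert_sequence_to_symmetric_laminate (sequence : List Int) (isodd : Bool) : Prop :=
  ∀ v ∈ sequence, v = 0 ∨ v = 1 ∨ v = 2 ∨ v = 3
instance (sequence : List Int) (isodd : Bool) : Decidable (Pre_convert_sequence_to_symmetric_laminate sequence isodd) := by unfold Pre_convert_sequence_to_symmetric_laminate; infer_instance

def pvWitness_convert_sequence_to_symmetric_laminate : List Int × Bool := ([0, 2, 3, 1], true)

def Spec_convert_sequence_to_symmetric_laminate (sequence : List Int) (isodd : Bool) (out : List Int) : Prop := out = convert_sequence_to_symmetric_laminate_alt sequence isodd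
instance (sequence : List Int) (isodd : Bool) (out : List Int) : Decidable (Spec_convert_sequence_to_symmetric_laminate sequence isodd out) := by unfold Spec_convert_sequence_to_symmetric_laminate; infer_instance

-- ===== CLAIM (what is proved, stated in full; the proofs are below) =====
def Claim_equal_convert_sequence_to_symmetric_laminate : Prop := ∀ (sequence : List Int) (isodd : Bool), Dom_convert_sequence_to_symmetric_laminate sequence isodd → Pre_convert_sequence_to_symmetric_laminate sequence isodd → Spec_convert_sequence_to_symmetric_laminate sequence isodd (convert_sequence_to_symmetric_laminate sequence isodd)

-- ===== LEMMAS AND PROOFS =====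

-- B's reflected-index pass over output positions equals "mapped list ++ its reverse with a dropped seam":
-- drop d with d = 0 is the even case, d = 1 the odd (dropped middle ply) case.
theorem pv_reflect_eq (f : Int → Int) (L : List Int) (d : Nat) (hd : d ≤ 1) :
    (PySem.List.pyRange 0 (2 * (L.length : Int) - d) 1).map (fun j =>
      f (PySem.List.pyGetD L
          (if j < (L.length : Int) then j else 2 * (L.length : Int) - d - 1 - j) 0))
    = L.map f ++ (L.map f).reverse.drop d := by
  apply List.ext_getElem
  · simp [PySem.List.length_pyRange_one]
    omega
  · intro i h1 h2
    have hlen : i < (2 * L.length - d) := by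
      simpa [PySem.List.length_pyRange_one] using h1
    simp only [List.getElem_map, PySem.List.getElem_pyRange_one, zero_add]
    by_cases hc : i < L.length
    · rw [if_pos (by exact_mod_cast hc)]
      rw [PySem.List.pyGetD_eq_getElem L 0 (Int.natCast_nonneg i) (by exact_mod_cast hc)]
      rw [List.getElem_append_left (by simpa using hc)]
      simp
    · rw [if_neg (by omega)]
      rw [PySem.List.pyGetD_eq_getElem L 0 (by omega) (by omega)]
      rw [List.getElem_append_right (by simpa using hc)]
      rw [List.getElem_drop, List.getElem_reverse, List.getElem_map]
      congr 1
      exact getElem_congr rfl (by simp; omega) (by simp; omega)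

theorem convert_eq (sequence : List Int) (isodd : Bool) :
    convert_sequence_to_symmetric_laminate sequence isodd
      = convert_sequence_to_symmetric_laminate_alt sequence isodd := by
  unfold convert_sequence_to_symmetric_laminate convert_sequence_to_symmetric_laminate_alt
  simp only [PySem.List.foldl_append_singleton_eq_map, PySem.List.slice_from_one,
    PySem.List.len_eq, pvConvA, pvConvA]
  cases isodd
  · simpa using (pv_reflect_eq
      (fun v => PySem.Dict.getD (PySem.Dict.ofList [(0,0),(1,90),(2,45),(3,-45)]) v 0)
      sequence 0 (by omega)).symm
  · have h := (pv_reflect_eq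
      (fun v => PySem.Dict.getD (PySem.Dict.ofList [(0,0),(1,90),(2,45),(3,-45)]) v 0)
      sequence 1 (by omega)).symm
    simp only [List.drop_one] at h
    simpa using h

-- ===== VERDICT (by name: the statement is the Claim_ definition above) =====
theorem convert_sequence_to_symmetric_laminate_spec : Claim_equal_convert_sequence_to_symmetric_laminate := by
  intro sequence isodd _ _
  unfold Spec_convert_sequence_to_symmetric_laminate
  exact convert_eq sequence isodd
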